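-- pv_equiv track=rewrite | github.com/soumadip/LTE_HO_MY_MODS | py_codes/play7.py | count_pp
-- ===== SOURCE A (Python) =====
-- def count_pp(ueas, win = 4):
--     count = 0
--     skip = 0
--     for i in range (len (ueas) - win) :
--         if skip:
--             skip -= 1
--             continue
--         wind = ueas [i : i + win]
--         for e in range (len (wind) - 2) :
--             if wind [e] in wind [e + 2 : ] and wind [e] != wind [e + 1]:
--                 count += 1
--                 #print (wind)
--                 skip = win
--                 break
--     return count
-- ===== SOURCE B (Python) =====
-- def count_pp(ueas, win=4):
--     # Pass 1: a table hits[i] = window ueas[i:i+win] has an element equal to a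
--     # non-adjacent later element and different from its immediate neighbour.
--     hits = []
--     for i in range(len(ueas) - win):
--         w = ueas[i:i + win]
--         hits.append(any(w[e] != w[e + 1] and w[e] in w[e + 2:]
--                         for e in range(len(w) - 2)))
--     # Pass 2: sequential scan with a skip counter consuming the table.
--     count = 0
--     skip = 0
--     for h in hits:
--         if skip:
--             skip -= 1
--         elif h:
--             count += 1
--             skip = win
--     return count
-- ===== Notes on version B (the rewrite author's own statement) =====
-- stated objective: alternative
-- what changed: B splits A's single interleaved loop into two passes: it first builds a boolean table hits[i] (window i contains an element equal to a non-adjacent later one and differing from its neighbour, via any(...)), then a separate scan over that table maintains only the skip counter and the count.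
import Mathlib
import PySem

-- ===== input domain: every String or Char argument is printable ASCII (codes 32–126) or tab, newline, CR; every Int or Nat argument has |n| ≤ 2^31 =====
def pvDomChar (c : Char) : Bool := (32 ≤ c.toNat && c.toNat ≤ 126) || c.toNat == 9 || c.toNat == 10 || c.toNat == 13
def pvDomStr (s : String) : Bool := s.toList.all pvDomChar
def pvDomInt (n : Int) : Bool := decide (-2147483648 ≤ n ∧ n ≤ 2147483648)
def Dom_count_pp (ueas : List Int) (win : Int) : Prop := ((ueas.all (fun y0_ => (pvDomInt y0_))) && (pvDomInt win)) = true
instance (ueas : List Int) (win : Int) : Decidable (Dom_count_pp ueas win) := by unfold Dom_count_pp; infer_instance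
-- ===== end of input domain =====

-- B: two-pass decomposition (detection table, then a skip-scan over it); same cost, alternative structure.

-- ===== PORT A =====
-- inner 'for e ... break' loop of A: first e whose condition fires sets count/skip and breaks.
-- pyGetD is exact here: every e drawn from range(len(wind)-2) indexes wind in bounds.
def pvInnerA (wind : List Int) (win count skip : Int) : List Int → Int × Int
  | [] => (count, skip)
  | e :: rest =>
    if (PySem.List.slice wind (some (e + 2)) none).contains (PySem.List.pyGetD wind e 0)
        ∧ PySem.List.pyGetD wind e 0 ≠ PySem.List.pyGetD wind (e + 1) 0 then
      (count + 1, win)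
    else
      pvInnerA wind win count skip rest

def count_pp (ueas : List Int) (win : Int) : Int :=
  (((PySem.List.pyRange 0 ((ueas.length : Int) - win) 1).foldl
    (fun (cs : Int × Int) i =>
      if cs.2 ≠ 0 then (cs.1, cs.2 - 1)
      else
        pvInnerA (PySem.List.slice ueas (some i) (some (i + win))) win cs.1 cs.2
          (PySem.List.pyRange 0 (((PySem.List.slice ueas (some i) (some (i + win))).length : Int) - 2) 1))
    (0, 0)) : Int × Int).1

-- ===== PORT B =====
-- hits[i]: the window ueas[i:i+win] has some e with w[e] != w[e+1] and w[e] in w[e+2:].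
def pvHit (w : List Int) (e : Int) : Bool :=
  decide (PySem.List.pyGetD w e 0 ≠ PySem.List.pyGetD w (e + 1) 0)
    && (PySem.List.slice w (some (e + 2)) none).contains (PySem.List.pyGetD w e 0)

-- hits[i]: any e with w[e] != w[e+1] and w[e] in w[e+2:], for w = ueas[i:i+win]
def pvHits (ueas : List Int) (win i : Int) : Bool :=
  (PySem.List.pyRange 0 (((PySem.List.slice ueas (some i) (some (i + win))).length : Int) - 2) 1).any
    (pvHit (PySem.List.slice ueas (some i) (some (i + win))))

def count_pp_alt (ueas : List Int) (win : Int) : Int :=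
  ((((PySem.List.pyRange 0 ((ueas.length : Int) - win) 1).map (pvHits ueas win)).foldl
    (fun (cs : Int × Int) h =>
      if cs.2 ≠ 0 then (cs.1, cs.2 - 1)
      else if h then (cs.1 + 1, win) else cs)
    (0, 0)) : Int × Int).1

-- ===== PRECONDITION & SPEC =====
def Spec_count_pp (ueas : List Int) (win : Int) (out : Int) : Prop := out = count_pp_alt ueas win
instance (ueas : List Int) (win : Int) (out : Int) : Decidable (Spec_count_pp ueas win out) := by unfold Spec_count_pp; infer_instance

-- ===== CLAIM (what is proved, stated in full; the proofs are below) =====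
def Claim_equal_count_pp : Prop := ∀ (ueas : List Int) (win : Int), Dom_count_pp ueas win → Spec_count_pp ueas win (count_pp ueas win)

-- ===== LEMMAS AND PROOFS =====

-- A's inner break-loop is an 'any' over the same range.
theorem pvInnerA_eq_any (wind : List Int) (win count skip : Int) (es : List Int) :
    pvInnerA wind win count skip es =
      (if es.any (pvHit wind) then (count + 1, win) else (count, skip)) := by
  induction es with
  | nil => simp [pvInnerA]
  | cons e rest ih =>
    simp only [pvInnerA, List.any_cons, ih, pvHit, Bool.or_eq_true, Bool.and_eq_true,
      decide_eq_true_eq, List.contains_eq_mem, decide_eq_true_eq]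
    split_ifs <;> tauto

-- ===== VERDICT (by name: the statement is the Claim_ definition above) =====
theorem count_pp_spec : Claim_equal_count_pp := by
  intro ueas win _
  unfold Spec_count_pp count_pp count_pp_alt
  rw [List.foldl_map]
  congr 1
  apply PySem.List.foldl_congr_mem
  intro cs i _
  by_cases hs : cs.2 ≠ 0
  · simp [hs]
  · push Not at hs
    simp only [hs, ne_eq, not_true_eq_false, if_false, pvHits, pvInnerA_eq_any]
    split
    · rfl
    · exact (Prod.ext rfl hs.symm)
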